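-- pv_equiv track=rewrite | github.com/nazlidenizurenli/Read-REST | ml/preprocess.py | refine_genres
-- ===== SOURCE A (Python) =====
-- def refine_genres(genres):
--     """
--     Refine the list of genres to remove redundancies and ensure uniqueness.
--     Exclude genres with more than one word (except 'self help'), and standardize 'self help' to 'selfhelp'.
--
--     Parameters:
--     genres (list of str): List of genre strings.
--
--     Returns:
--     list of str: Refined list of unique genres.
--     """
--     # Convert genres to lowercase for consistent comparison
--     genres = [genre.lower() for genre in genres]
--
--     # Normalize 'self help' to 'selfhelp'
--     genres = ['selfhelp' if genre == 'self help' else genre for genre in genres]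
--
--     # Remove genres with more than one word, except 'selfhelp'
--     genres = [genre for genre in genres if ' ' not in genre or genre == 'selfhelp']
--
--     # Create a dictionary to store the shortest genre for each prefix
--     genre_dict = {}
--
--     # Iterate through genres to identify and keep the shortest genre
--     for genre in genres:
--         found = False
--         for existing_genre in list(genre_dict.keys()):
--             if genre.startswith(existing_genre[:4]):
--                 found = True
--                 if len(genre) < len(existing_genre):
--                     genre_dict[genre] = True
--                     del genre_dict[existing_genre]
--                 break
--         if not found:
--             genre_dict[genre] = True
--
--     # Return the sorted list of unique genres
--     return sorted(genre_dict.keys(), key=lambda g: genres.count(g), reverse=True)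
-- ===== SOURCE B (Python) =====
-- from collections import Counter
--
--
-- def refine_genres(genres):
--     """
--     Refine the list of genres to remove redundancies and ensure uniqueness.
--     Exclude genres with more than one word (except 'self help'), and standardize 'self help' to 'selfhelp'.
--
--     Parameters:
--     genres (list of str): List of genre strings.
--
--     Returns:
--     list of str: Refined list of unique genres.
--     """
--     # Single normalization/filter pass.
--     norm = []
--     for raw in genres:
--         g = raw.lower()
--         if g == 'self help':
--             g = 'selfhelp'
--         if ' ' not in g or g == 'selfhelp':
--             norm.append(g)
--
--     # index: 4-char prefix -> (insertion position, kept genre).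
--     # A kept genre matches g iff its 4-char prefix is a prefix of g, i.e. iff
--     # that prefix is one of g[:0], ..., g[:min(4, len(g))]: at most 5 lookups.
--     index = {}
--     pos = 0
--     for g in norm:
--         best = None
--         for k in range(min(4, len(g)) + 1):
--             hit = index.get(g[:k])
--             if hit is not None and (best is None or hit[0] < best[0]):
--                 best = hit
--         if best is None:
--             index[g[:4]] = (pos, g)
--             pos += 1
--         elif len(g) < len(best[1]):
--             del index[best[1][:4]]
--             old = index.get(g[:4])
--             if old is not None and old[1] == g:
--                 pass  # g itself is already a kept genre; it keeps its position
--             else: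
--                 index[g[:4]] = (pos, g)
--                 pos += 1
--
--     # Kept genres in insertion order, then frequency sort (stable, descending).
--     cnt = Counter(norm)
--     kept = [g for _, g in sorted(index.values(), key=lambda v: v[0])]
--     return sorted(kept, key=lambda g: cnt[g], reverse=True)
-- ===== Notes on version B (the rewrite author's own statement) =====
-- stated objective: faster
-- what changed: Replaces A's per-genre linear scan of all kept genres with a dict keyed by 4-char prefix (at most 5 lookups per genre, insertion position tracked to reproduce A's first-match order) and replaces the O(n) genres.count sort key with a Counter built once; normalization is fused into one pass.
import Mathlib
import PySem

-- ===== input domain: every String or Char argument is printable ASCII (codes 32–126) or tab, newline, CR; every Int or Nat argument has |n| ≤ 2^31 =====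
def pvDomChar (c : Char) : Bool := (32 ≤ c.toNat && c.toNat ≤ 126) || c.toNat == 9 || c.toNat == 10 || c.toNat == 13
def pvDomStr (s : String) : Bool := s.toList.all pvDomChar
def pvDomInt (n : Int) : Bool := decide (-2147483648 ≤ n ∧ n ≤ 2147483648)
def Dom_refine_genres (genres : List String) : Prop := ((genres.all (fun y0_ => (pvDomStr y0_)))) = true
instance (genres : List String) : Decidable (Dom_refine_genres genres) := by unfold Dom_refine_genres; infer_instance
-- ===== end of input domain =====

-- B replaces A's linear scan of kept genres per element and its O(n) genres.count sort key
-- by a 4-char-prefix index (≤ 5 lookups per genre) and a Counter built once.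

-- ===== PORT A =====
-- inner loop of A: scan the dict's keys, break at the first existing genre whose 4-char prefix starts `genre`
def refineFindMatch (genre : String) : List String → Option String
  | [] => none
  | e :: rest =>
    if PySem.Str.startswith genre (PySem.Str.slice e none (some 4)) then some e
    else refineFindMatch genre rest

-- body of A's outer loop
def refineStepA (d : PySem.Dict String Bool) (genre : String) : PySem.Dict String Bool :=
  match refineFindMatch genre d.keys with
  | some existing =>
    if PySem.Str.len genre < PySem.Str.len existing then (d.insert genre true).erase existing
    else d
  | none => d.insert genre true

def refine_genres (genres : List String) : List String :=
  let genres1 := genres.map (fun genre => PySem.Str.lower genre)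
  let genres2 := genres1.map (fun genre => if genre = "self help" then "selfhelp" else genre)
  let genres3 := genres2.filter (fun genre => !(PySem.Str.isIn " " genre) || genre = "selfhelp")
  let d := genres3.foldl refineStepA PySem.Dict.empty
  PySem.List.sorted d.keys (fun g => (PySem.List.count genres3 g : Int)) true

-- ===== PORT B =====
-- B's inner loop: best (minimal-position) hit among the ≤ 5 prefix lookups g[:0] … g[:min(4,len g)]
def refineBest (index : PySem.Dict String (Int × String)) (g : String) : Option (Int × String) :=
  (PySem.List.pyRange 0 (min 4 (PySem.Str.len g) + 1) 1).foldl
    (fun best k =>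
      match index.get? (PySem.Str.slice g none (some k)) with
      | some hit =>
        match best with
        | none => some hit
        | some b => if hit.1 < b.1 then some hit else some b
      | none => best)
    none

-- body of B's loop: state = (prefix index, next insertion position)
def refineStepB (st : PySem.Dict String (Int × String) × Int) (g : String) :
    PySem.Dict String (Int × String) × Int :=
  let index := st.1
  let pos := st.2
  match refineBest index g with
  | none => (index.insert (PySem.Str.slice g none (some 4)) (pos, g), pos + 1)
  | some b =>
    if PySem.Str.len g < PySem.Str.len b.2 then
      let index2 := index.erase (PySem.Str.slice b.2 none (some 4))
      match index2.get? (PySem.Str.slice g none (some 4)) with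
      | some old =>
        if old.2 = g then (index2, pos)
        else (index2.insert (PySem.Str.slice g none (some 4)) (pos, g), pos + 1)
      | none => (index2.insert (PySem.Str.slice g none (some 4)) (pos, g), pos + 1)
    else (index, pos)

def refine_genres_alt (genres : List String) : List String :=
  let norm := genres.foldl
    (fun acc raw =>
      let g := PySem.Str.lower raw
      let g := if g = "self help" then "selfhelp" else g
      if !(PySem.Str.isIn " " g) || g = "selfhelp" then acc ++ [g] else acc) []
  let st := norm.foldl refineStepB (PySem.Dict.empty, 0)
  let cnt := PySem.Dict.counter norm
  let kept := (PySem.List.sorted st.1.values (fun v => v.1) false).map (fun v => v.2)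
  PySem.List.sorted kept (fun g => cnt.getD g 0) true

-- ===== PRECONDITION & SPEC =====
def Spec_refine_genres (genres : List String) (out : List String) : Prop := out = refine_genres_alt genres
instance (genres : List String) (out : List String) : Decidable (Spec_refine_genres genres out) := by unfold Spec_refine_genres; infer_instance

-- ===== CLAIM (what is proved, stated in full; the proofs are below) =====
def Claim_equal_refine_genres : Prop := ∀ (genres : List String), Dom_refine_genres genres → Spec_refine_genres genres (refine_genres genres)

-- ===== LEMMAS AND PROOFS =====

-- `s[:4]` as used by both ports
def pvTk4 (s : String) : String := PySem.Str.slice s none (some 4)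

-- "kept entry e matches g": g starts with e's 4-char prefix
def pvMatch (g : String) (e : Int × String) : Bool :=
  PySem.Str.startswith g (PySem.Str.slice e.2 none (some 4))

-- the coupling invariant between A's dict and B's (index, pos)
def pvInv (d : PySem.Dict String Bool) (index : PySem.Dict String (Int × String)) (pos : Int) : Prop :=
  ∃ E : List (Int × String),
    E.map Prod.snd = d.keys ∧
    E.Pairwise (fun a b => a.1 < b.1) ∧
    (∀ e ∈ E, e.1 < pos) ∧
    (∀ kv ∈ d.items, kv.2 = true) ∧
    (d.keys.map pvTk4).Nodup ∧
    index.items.Perm (E.map (fun e => (pvTk4 e.2, e)))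

lemma slice_toList (s : String) (j : Int) (hj : 0 ≤ j) :
    (PySem.Str.slice s none (some j)).toList = s.toList.take j.toNat := by
  rw [PySem.Str.toList_slice, PySem.Chars.slice_eq_listSlice, PySem.List.slice_to _ hj]

lemma pvTk4_toList (s : String) : (pvTk4 s).toList = s.toList.take 4 := by
  rw [pvTk4, slice_toList s 4 (by norm_num)]; rfl

lemma startswith_iff (g p : String) :
    PySem.Str.startswith g p = true ↔ p.toList <+: g.toList := by
  rw [PySem.Str.startswith_eq, PySem.Chars.startswith_iff]

lemma pvMatch_iff (g : String) (e : Int × String) :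
    pvMatch g e = true ↔ e.2.toList.take 4 <+: g.toList := by
  rw [pvMatch, startswith_iff, ← pvTk4_toList, pvTk4]


lemma find?_min_fst {E : List (Int × String)} {p : Int × String → Bool} {b : Int × String}
    (hp : E.Pairwise (fun a b => a.1 < b.1)) (h : E.find? p = some b) :
    b ∈ E ∧ p b = true ∧ ∀ x ∈ E, p x = true → b.1 ≤ x.1 := by
  induction E with
  | nil => simp at h
  | cons e E ih =>
    rw [List.find?_cons] at h
    rw [List.pairwise_cons] at hp
    by_cases he : p e = true
    · simp [he] at h
      subst h
      refine ⟨List.mem_cons_self, he, ?_⟩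
      intro x hx _
      rcases List.mem_cons.mp hx with rfl | hx
      · exact le_refl _
      · exact le_of_lt (hp.1 x hx)
    · simp [he] at h
      obtain ⟨hb, hpb, hmin⟩ := ih hp.2 h
      refine ⟨List.mem_cons_of_mem _ hb, hpb, ?_⟩
      intro x hx hpx
      rcases List.mem_cons.mp hx with rfl | hx
      · exact absurd hpx he
      · exact hmin x hx hpx

lemma pairwise_fst_inj {E : List (Int × String)} (hp : E.Pairwise (fun a b => a.1 < b.1))
    {a c : Int × String} (ha : a ∈ E) (hc : c ∈ E) (h : a.1 = c.1) : a = c := by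
  induction E with
  | nil => simp at ha
  | cons e E ih =>
    rw [List.pairwise_cons] at hp
    rcases List.mem_cons.mp ha with ha' | ha <;> rcases List.mem_cons.mp hc with hc' | hc
    · rw [ha', hc']
    · have h2 := hp.1 c hc; rw [ha'] at h; omega
    · have h2 := hp.1 a ha; rw [hc'] at h; omega
    · exact ih hp.2 ha hc

lemma map_filter_comm {α β : Type} (f : α → β) (q : β → Bool) (l : List α) :
    (l.map f).filter q = (l.filter (fun a => q (f a))).map f := by
  induction l with
  | nil => rfl
  | cons x l ih =>
    simp only [List.map_cons, List.filter_cons]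
    by_cases h : q (f x) = true <;> simp [h, ih]

lemma findMatch_eq_find? (g : String) (E : List (Int × String)) :
    refineFindMatch g (E.map Prod.snd) = (E.find? (pvMatch g)).map Prod.snd := by
  induction E with
  | nil => rfl
  | cons e E ih =>
    simp only [List.map_cons, refineFindMatch, List.find?_cons]
    cases hb : pvMatch g e with
    | true =>
      have hb' : PySem.Str.startswith g (PySem.Str.slice e.2 none (some 4)) = true := hb
      rw [if_pos hb']; rfl
    | false =>
      have hb' : PySem.Str.startswith g (PySem.Str.slice e.2 none (some 4)) = false := hb
      rw [if_neg (by rw [hb']; simp), ih]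

lemma minfold_spec (l : List (Int × String)) :
    ∀ acc : Option (Int × String),
      (l.foldl (fun best hit =>
          match best with
          | none => some hit
          | some b => if hit.1 < b.1 then some hit else some b) acc = none
        → acc = none ∧ l = []) ∧
      (∀ b, l.foldl (fun best hit =>
          match best with
          | none => some hit
          | some b => if hit.1 < b.1 then some hit else some b) acc = some b
        → (acc = some b ∨ b ∈ l) ∧ (∀ a, acc = some a → b.1 ≤ a.1) ∧ ∀ x ∈ l, b.1 ≤ x.1) := by
  induction l with
  | nil =>
    intro acc
    refine ⟨fun h => ⟨h, rfl⟩, fun b h => ?_⟩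
    have h' : acc = some b := h
    exact ⟨Or.inl h', fun a ha => by rw [h'] at ha; injection ha with ha; rw [ha], by simp⟩
  | cons hit l ih =>
    intro acc
    constructor
    · intro h
      simp only [List.foldl_cons] at h
      cases acc with
      | none => exact absurd ((ih (some hit)).1 h).1 (by simp)
      | some b =>
        by_cases hlt : hit.1 < b.1 <;> simp [hlt] at h <;>
          [exact absurd ((ih (some hit)).1 h).1 (by simp);
           exact absurd ((ih (some b)).1 h).1 (by simp)]
    · intro b h
      simp only [List.foldl_cons] at h
      cases acc with
      | none =>
        obtain ⟨hmem, hacc, hall⟩ := (ih (some hit)).2 b h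
        refine ⟨Or.inr ?_, by simp, ?_⟩
        · rcases hmem with h' | h'
          · simp at h'; rw [h']; exact List.mem_cons_self
          · exact List.mem_cons_of_mem _ h'
        · intro x hx
          rcases List.mem_cons.mp hx with rfl | hx
          · exact hacc _ rfl
          · exact hall x hx
      | some a =>
        by_cases hlt : hit.1 < a.1 <;> simp only [hlt, if_pos, if_neg, ite_true, ite_false] at h
        · obtain ⟨hmem, hacc, hall⟩ := (ih (some hit)).2 b h
          have hba : b.1 ≤ hit.1 := hacc _ rfl
          refine ⟨?_, ?_, ?_⟩
          · rcases hmem with h' | h'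
            · simp at h'; rw [h']; exact Or.inr List.mem_cons_self
            · exact Or.inr (List.mem_cons_of_mem _ h')
          · intro a' ha'; injection ha' with ha'; subst ha'; omega
          · intro x hx
            rcases List.mem_cons.mp hx with rfl | hx
            · exact hba
            · exact hall x hx
        · obtain ⟨hmem, hacc, hall⟩ := (ih (some a)).2 b h
          have hba : b.1 ≤ a.1 := hacc _ rfl
          refine ⟨?_, ?_, ?_⟩
          · rcases hmem with h' | h'
            · exact Or.inl h'
            · exact Or.inr (List.mem_cons_of_mem _ h')
          · intro a' ha'; injection ha' with ha'; subst ha'; exact hba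
          · intro x hx
            rcases List.mem_cons.mp hx with rfl | hx
            · omega
            · exact hall x hx
lemma bestfold_aux (index : PySem.Dict String (Int × String)) (g : String) :
    ∀ (js : List Int) (acc : Option (Int × String)),
      js.foldl
        (fun best k =>
          match index.get? (PySem.Str.slice g none (some k)) with
          | some hit =>
            match best with
            | none => some hit
            | some b => if hit.1 < b.1 then some hit else some b
          | none => best) acc
      = ((js.filterMap (fun k => index.get? (PySem.Str.slice g none (some k)))).foldl
          (fun best hit =>
            match best with
            | none => some hit
            | some b => if hit.1 < b.1 then some hit else some b) acc) := by
  intro js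
  induction js with
  | nil => intro acc; rfl
  | cons j js ih =>
    intro acc
    simp only [List.foldl_cons, List.filterMap_cons]
    cases h : index.get? (PySem.Str.slice g none (some j)) with
    | none => simp only [h]; exact ih acc
    | some hit => simp only [h]; exact ih _

lemma refineBest_eq_minfold (index : PySem.Dict String (Int × String)) (g : String) :
    refineBest index g =
      ((PySem.List.pyRange 0 (min 4 (PySem.Str.len g) + 1) 1).filterMap
          (fun k => index.get? (PySem.Str.slice g none (some k)))).foldl
        (fun best hit =>
          match best with
          | none => some hit
          | some b => if hit.1 < b.1 then some hit else some b) none := by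
  rw [refineBest]
  exact bestfold_aux index g _ none

lemma index_get?_iff (index : PySem.Dict String (Int × String)) (E : List (Int × String))
    (hnodup : (E.map (fun e => pvTk4 e.2)).Nodup)
    (hperm : index.items.Perm (E.map (fun e => (pvTk4 e.2, e))))
    (s : String) (x : Int × String) :
    index.get? s = some x ↔ (x ∈ E ∧ pvTk4 x.2 = s) := by
  have hkeys : index.keys.Nodup := by
    have h1 := hperm.map Prod.fst
    rw [List.map_map] at h1
    exact h1.nodup_iff.mpr hnodup
  rw [PySem.Dict.get?_eq_some_iff_mem_items index s x hkeys, hperm.mem_iff, List.mem_map]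
  constructor
  · rintro ⟨e, he, heq⟩
    obtain ⟨h1, h2⟩ := Prod.mk.injEq .. ▸ heq
    exact ⟨h2 ▸ he, h2 ▸ h1⟩
  · rintro ⟨hx, hs⟩
    exact ⟨x, hx, by rw [hs]⟩

lemma mem_hits_iff (index : PySem.Dict String (Int × String)) (E : List (Int × String))
    (g : String)
    (hnodup : (E.map (fun e => pvTk4 e.2)).Nodup)
    (hperm : index.items.Perm (E.map (fun e => (pvTk4 e.2, e))))
    (x : Int × String) :
    x ∈ (PySem.List.pyRange 0 (min 4 (PySem.Str.len g) + 1) 1).filterMap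
        (fun k => index.get? (PySem.Str.slice g none (some k)))
      ↔ (x ∈ E ∧ pvMatch g x = true) := by
  rw [List.mem_filterMap]
  constructor
  · rintro ⟨j, hj, hx⟩
    obtain ⟨hj0, hjlt⟩ := PySem.List.mem_pyRange_one.mp hj
    obtain ⟨hxE, hxs⟩ := (index_get?_iff index E hnodup hperm _ x).mp hx
    refine ⟨hxE, ?_⟩
    rw [pvMatch_iff]
    have h1 : (pvTk4 x.2).toList = (PySem.Str.slice g none (some j)).toList := by rw [hxs]
    rw [pvTk4_toList, slice_toList g j hj0] at h1
    rw [h1]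
    exact List.take_prefix _ _
  · rintro ⟨hxE, hxm⟩
    rw [pvMatch_iff] at hxm
    set t := x.2.toList.take 4 with ht
    refine ⟨(t.length : Int), ?_, ?_⟩
    · rw [PySem.List.mem_pyRange_one]
      constructor
      · positivity
      · have h4 : t.length ≤ 4 := by rw [ht]; simpa using List.length_take_le 4 x.2.toList
        have hg : t.length ≤ g.toList.length := hxm.length_le
        rw [PySem.Str.len_eq]
        have : (t.length : Int) ≤ min 4 (g.toList.length : Int) := by
          rw [le_min_iff]; constructor <;> [exact_mod_cast h4; exact_mod_cast hg]
        omega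
    · rw [index_get?_iff index E hnodup hperm]
      refine ⟨hxE, ?_⟩
      apply String.ext
      rw [pvTk4_toList, slice_toList g _ (by positivity), Int.toNat_natCast]
      rw [← ht]
      exact List.prefix_iff_eq_take.mp hxm

lemma refineBest_eq_find? (index : PySem.Dict String (Int × String)) (E : List (Int × String))
    (g : String)
    (hpw : E.Pairwise (fun a b => a.1 < b.1))
    (hnodup : (E.map (fun e => pvTk4 e.2)).Nodup)
    (hperm : index.items.Perm (E.map (fun e => (pvTk4 e.2, e)))) :
    refineBest index g = E.find? (pvMatch g) := by
  rw [refineBest_eq_minfold]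
  cases hfind : E.find? (pvMatch g) with
  | none =>
    have hnone := List.find?_eq_none.mp hfind
    have hempty : (PySem.List.pyRange 0 (min 4 (PySem.Str.len g) + 1) 1).filterMap
        (fun k => index.get? (PySem.Str.slice g none (some k))) = [] := by
      rw [List.eq_nil_iff_forall_not_mem]
      intro x hx
      obtain ⟨hxE, hxm⟩ := (mem_hits_iff index E g hnodup hperm x).mp hx
      exact hnone x hxE hxm
    rw [hempty]
    rfl
  | some e0 =>
    obtain ⟨he0E, he0p, he0min⟩ := find?_min_fst hpw hfind
    have he0hits := (mem_hits_iff index E g hnodup hperm e0).mpr ⟨he0E, he0p⟩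
    cases hres : ((PySem.List.pyRange 0 (min 4 (PySem.Str.len g) + 1) 1).filterMap
        (fun k => index.get? (PySem.Str.slice g none (some k)))).foldl
        (fun best hit =>
          match best with
          | none => some hit
          | some b => if hit.1 < b.1 then some hit else some b) none with
    | none =>
      obtain ⟨-, hnil⟩ := (minfold_spec _ none).1 hres
      rw [hnil] at he0hits
      simp at he0hits
    | some b =>
      obtain ⟨hmem, -, hall⟩ := (minfold_spec _ none).2 b hres
      have hbhits : b ∈ (PySem.List.pyRange 0 (min 4 (PySem.Str.len g) + 1) 1).filterMap
          (fun k => index.get? (PySem.Str.slice g none (some k))) := by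
        rcases hmem with h' | h'
        · exact absurd h' (by simp)
        · exact h'
      obtain ⟨hbE, hbp⟩ := (mem_hits_iff index E g hnodup hperm b).mp hbhits
      have h1 : b.1 ≤ e0.1 := hall e0 he0hits
      have h2 : e0.1 ≤ b.1 := he0min b hbE hbp
      rw [pairwise_fst_inj hpw hbE he0E (le_antisymm h1 h2)]

lemma items_erase {κ ν : Type} [BEq κ] (d : PySem.Dict κ ν) (k : κ) :
    (d.erase k).items = d.items.filter (fun p => !(p.1 == k)) := rfl

lemma contains_eq_false_iff {κ ν : Type} [BEq κ] [LawfulBEq κ] (d : PySem.Dict κ ν) (k : κ) :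
    d.contains k = false ↔ k ∉ d.keys := by
  rw [Bool.eq_false_iff, Ne, PySem.Dict.contains_iff_mem_keys]

lemma map_id_of {α : Type} (l : List α) (f : α → α) (h : ∀ x ∈ l, f x = x) : l.map f = l := by
  induction l with
  | nil => rfl
  | cons x l ih => rw [List.map_cons, h x List.mem_cons_self,
      ih (fun y hy => h y (List.mem_cons_of_mem _ hy))]

lemma collision_cases (g k0 m : String) (hm : pvTk4 m = pvTk4 g)
    (hmatch : k0.toList.take 4 <+: g.toList) (hlen : g.toList.length < k0.toList.length) :
    m = g ∨ pvTk4 m = pvTk4 k0 := by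
  have hm' := congrArg String.toList hm
  rw [pvTk4_toList, pvTk4_toList] at hm'
  by_cases h4 : 4 ≤ g.toList.length
  · right
    have hlen4 : (k0.toList.take 4).length = 4 := by rw [List.length_take]; omega
    have h1 := List.prefix_iff_eq_take.mp hmatch
    rw [hlen4] at h1
    apply String.ext
    rw [pvTk4_toList, pvTk4_toList, hm', ← h1]
  · left
    rw [not_le] at h4
    have hg : g.toList.take 4 = g.toList := List.take_of_length_le (by omega)
    rw [hg] at hm'
    have hlm : m.toList.length < 4 := by
      have := congrArg List.length hm'
      rw [List.length_take] at this
      omega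
    rw [List.take_of_length_le (by omega)] at hm'
    exact String.ext hm'

lemma pvTk4_def (s : String) : PySem.Str.slice s none (some 4) = pvTk4 s := rfl

lemma step_preserves (d : PySem.Dict String Bool) (index : PySem.Dict String (Int × String))
    (pos : Int) (g : String) (h : pvInv d index pos) :
    pvInv (refineStepA d g) (refineStepB (index, pos) g).1 (refineStepB (index, pos) g).2 := by
  obtain ⟨E, hkeysE, hpw, hbound, hval, hnodup, hperm⟩ := h
  have hnodupE : (E.map (fun e => pvTk4 e.2)).Nodup := by
    rw [← hkeysE, List.map_map] at hnodup
    exact hnodup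
  have hnodup' : (d.keys.map pvTk4).Nodup := by rw [← hkeysE, List.map_map]; exact hnodupE
  have hkeysnd : d.keys.Nodup := List.Nodup.of_map pvTk4 hnodup'
  have hbest := refineBest_eq_find? index E g hpw hnodupE hperm
  have hfindm : refineFindMatch g d.keys = (E.find? (pvMatch g)).map Prod.snd := by
    rw [← hkeysE]; exact findMatch_eq_find? g E
  rw [refineStepA, refineStepB]
  simp only []
  cases hfind : E.find? (pvMatch g) with
  | none =>
    rw [hfind] at hbest hfindm
    rw [hfindm, hbest]
    show pvInv (d.insert g true) (index.insert (PySem.Str.slice g none (some 4)) (pos, g)) (pos + 1)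
    have hgnotin : g ∉ d.keys := by
      intro hg
      rw [← hkeysE] at hg
      obtain ⟨e, heE, he2⟩ := List.mem_map.mp hg
      have hm : pvMatch g e = true := by
        rw [pvMatch_iff, he2]; exact List.take_prefix _ _
      exact List.find?_eq_none.mp hfind e heE hm
    have htknotin : ∀ e ∈ E, pvTk4 e.2 ≠ pvTk4 g := by
      intro e heE hEq
      have h2 := congrArg String.toList hEq
      rw [pvTk4_toList, pvTk4_toList] at h2
      have hm : pvMatch g e = true := by
        rw [pvMatch_iff, h2]; exact List.take_prefix _ _
      exact List.find?_eq_none.mp hfind e heE hm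
    have hcontd : d.contains g = false := (contains_eq_false_iff d g).mpr hgnotin
    have hconti : index.contains (PySem.Str.slice g none (some 4)) = false := by
      rw [contains_eq_false_iff]
      intro hmem
      have hkperm : index.keys.Perm (E.map (fun e => pvTk4 e.2)) := by
        have h3 := hperm.map Prod.fst; rw [List.map_map] at h3; exact h3
      rw [hkperm.mem_iff] at hmem
      obtain ⟨e, heE, he⟩ := List.mem_map.mp hmem
      exact htknotin e heE he
    refine ⟨E ++ [(pos, g)], ?_, ?_, ?_, ?_, ?_, ?_⟩
    · rw [List.map_append, hkeysE]
      show _ = (d.insert g true).items.map Prod.fst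
      rw [PySem.Dict.items_insert_of_not_contains d true hcontd, List.map_append]
      rfl
    · rw [List.pairwise_append]
      refine ⟨hpw, List.pairwise_singleton _ _, ?_⟩
      intro a ha b hb
      simp only [List.mem_singleton] at hb
      rw [hb]
      exact hbound a ha
    · intro e he
      rcases List.mem_append.mp he with he | he
      · have := hbound e he; omega
      · simp only [List.mem_singleton] at he
        rw [he]
        show pos < pos + 1
        omega
    · intro kv hkv
      rw [PySem.Dict.items_insert_of_not_contains d true hcontd] at hkv
      rcases List.mem_append.mp hkv with h' | h'
      · exact hval kv h'
      · simp only [List.mem_singleton] at h'; rw [h']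
    · show ((d.insert g true).items.map Prod.fst |>.map pvTk4).Nodup
      rw [PySem.Dict.items_insert_of_not_contains d true hcontd, List.map_append, List.map_append]
      rw [List.nodup_append]
      refine ⟨hnodup', by simp, ?_⟩
      intro x hx y hy
      have hy' : y = pvTk4 g := List.mem_singleton.mp hy
      have hx'' : x ∈ List.map pvTk4 (List.map Prod.snd E) := by rw [hkeysE]; exact hx
      rw [List.map_map] at hx''
      obtain ⟨e, heE, he⟩ := List.mem_map.mp hx''
      have he' : pvTk4 e.2 = x := he
      intro hxy
      exact htknotin e heE (by rw [he', hxy, hy'])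
    · rw [PySem.Dict.items_insert_of_not_contains index _ hconti, List.map_append]
      exact hperm.append_right _
  | some e0 =>
    rw [hfind] at hbest hfindm
    rw [hfindm, hbest]
    simp only [Option.map_some]
    by_cases hlen : PySem.Str.len g < PySem.Str.len e0.2
    · rw [if_pos hlen, if_pos hlen]
      rw [pvTk4_def e0.2, pvTk4_def g]
      have he0E : e0 ∈ E := List.mem_of_find?_eq_some hfind
      have he0p : pvMatch g e0 = true := List.find?_some hfind
      have hk0keys : e0.2 ∈ d.keys := by
        rw [← hkeysE]; exact List.mem_map_of_mem he0E
      have hglen : g.toList.length < e0.2.toList.length := by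
        rw [PySem.Str.len_eq, PySem.Str.len_eq] at hlen; exact_mod_cast hlen
      have hgne : g ≠ e0.2 := by intro hh; rw [hh] at hglen; omega
      have hmatch0 : e0.2.toList.take 4 <+: g.toList := (pvMatch_iff g e0).mp he0p
      have hinj : ∀ x ∈ d.keys, ∀ y ∈ d.keys, pvTk4 x = pvTk4 y → x = y :=
        fun x hx y hy hxy => List.inj_on_of_nodup_map hnodup' hx hy hxy
      have h2 : E.filter (fun e => !(pvTk4 e.2 == pvTk4 e0.2)) = E.filter (fun e => !(e.2 == e0.2)) := by
        apply List.filter_congr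
        intro e heE
        have hm : e.2 ∈ d.keys := by rw [← hkeysE]; exact List.mem_map_of_mem heE
        by_cases hcase : e.2 = e0.2
        · rw [hcase]; simp
        · have hne : pvTk4 e.2 ≠ pvTk4 e0.2 := fun hEq => hcase (hinj _ hm _ hk0keys hEq)
          simp [hcase, hne]
      have hperm2 : (index.erase (pvTk4 e0.2)).items.Perm
          ((E.filter (fun e => !(e.2 == e0.2))).map (fun e => (pvTk4 e.2, e))) := by
        rw [items_erase]
        have h1 := hperm.filter (fun p => !(p.1 == pvTk4 e0.2))
        rw [map_filter_comm (fun e => (pvTk4 e.2, e)) (fun p => !(p.1 == pvTk4 e0.2)) E] at h1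
        rwa [h2] at h1
      have hnd2 : (index.erase (pvTk4 e0.2)).keys.Nodup := by
        have h1 := hperm2.map Prod.fst
        rw [List.map_map] at h1
        apply h1.nodup_iff.mpr
        exact hnodupE.sublist ((E.filter_sublist).map _)
      by_cases hgkeys : g ∈ d.keys
      · -- g is itself a kept genre: A's overwrite leaves the dict unchanged up to deleting e0.2,
        -- B keeps g's existing index entry
        obtain ⟨eg, hegE, heg2⟩ : ∃ eg ∈ E, eg.2 = g := by
          rw [← hkeysE] at hgkeys; exact List.mem_map.mp hgkeys
        have hegE' : eg ∈ E.filter (fun e => !(e.2 == e0.2)) :=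
          List.mem_filter.mpr ⟨hegE, by simp [heg2, hgne]⟩
        have hget2 : (index.erase (pvTk4 e0.2)).get? (pvTk4 g) = some eg := by
          rw [PySem.Dict.get?_eq_some_iff_mem_items _ _ _ hnd2, hperm2.mem_iff]
          exact List.mem_map.mpr ⟨eg, hegE', by rw [heg2]⟩
        rw [hget2]
        simp only [heg2, if_true]
        show pvInv ((d.insert g true).erase e0.2) (index.erase (pvTk4 e0.2)) pos
        have hid : (d.insert g true).items = d.items := by
          rw [PySem.Dict.items_insert_of_contains d true ((PySem.Dict.contains_iff_mem_keys d g).mpr hgkeys)]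
          apply map_id_of
          intro p hp
          by_cases hpg : p.1 = g
          · have hpt : p.2 = true := hval p hp
            rw [if_pos (by simp [hpg])]
            exact (Prod.ext_iff.mpr ⟨hpg.symm, hpt.symm⟩)
          · rw [if_neg (by simp [hpg])]
        refine ⟨E.filter (fun e => !(e.2 == e0.2)), ?_, hpw.filter _,
            fun e he => hbound e (List.mem_filter.mp he).1, ?_, ?_, hperm2⟩
        · show _ = ((d.insert g true).erase e0.2).items.map Prod.fst
          rw [items_erase, hid,
            ← map_filter_comm Prod.snd (fun s => !(s == e0.2)) E,
            ← map_filter_comm Prod.fst (fun s => !(s == e0.2)) d.items]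
          rw [hkeysE]
          rfl
        · intro kv hkv
          rw [items_erase, hid] at hkv
          exact hval kv (List.mem_filter.mp hkv).1
        · show (((d.insert g true).erase e0.2).items.map Prod.fst |>.map pvTk4).Nodup
          rw [items_erase, hid]
          exact hnodup'.sublist (((d.items.filter_sublist).map Prod.fst).map pvTk4)
      · -- g is new: A appends it and deletes e0.2; B reindexes g under its own 4-prefix
        have hcontd : d.contains g = false := (contains_eq_false_iff d g).mpr hgkeys
        have hnocoll : ∀ k ∈ d.keys, k ≠ e0.2 → pvTk4 k ≠ pvTk4 g := by
          intro k hk hkne hEq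
          rcases collision_cases g e0.2 k hEq hmatch0 hglen with hh | hh
          · exact hgkeys (hh ▸ hk)
          · exact hkne (hinj _ hk _ hk0keys hh)
        have hnomem : pvTk4 g ∉ (index.erase (pvTk4 e0.2)).keys := by
          intro hmem
          have h1 := hperm2.map Prod.fst
          rw [List.map_map] at h1
          have hmem' : pvTk4 g ∈ List.map Prod.fst (index.erase (pvTk4 e0.2)).items := hmem
          rw [h1.mem_iff] at hmem'
          obtain ⟨e, heE', he⟩ := List.mem_map.mp hmem'
          have heE := (List.mem_filter.mp heE').1
          have hene : e.2 ≠ e0.2 := by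
            have hq := (List.mem_filter.mp heE').2
            simpa using hq
          have hk : e.2 ∈ d.keys := by rw [← hkeysE]; exact List.mem_map_of_mem heE
          have he' : pvTk4 e.2 = pvTk4 g := he
          exact hnocoll e.2 hk hene he'
        have hget2 : (index.erase (pvTk4 e0.2)).get? (pvTk4 g) = none :=
          (PySem.Dict.get?_eq_none_iff_not_mem_keys _ _).mpr hnomem
        have hcont2 : (index.erase (pvTk4 e0.2)).contains (pvTk4 g) = false :=
          (contains_eq_false_iff _ _).mpr hnomem
        rw [hget2]
        show pvInv ((d.insert g true).erase e0.2)
          ((index.erase (pvTk4 e0.2)).insert (pvTk4 g) (pos, g)) (pos + 1)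
        have hAitems : ((d.insert g true).erase e0.2).items
            = d.items.filter (fun p => !(p.1 == e0.2)) ++ [(g, true)] := by
          rw [items_erase, PySem.Dict.items_insert_of_not_contains d true hcontd, List.filter_append]
          congr 1
          simp [hgne]
        refine ⟨E.filter (fun e => !(e.2 == e0.2)) ++ [(pos, g)], ?_, ?_, ?_, ?_, ?_, ?_⟩
        · show _ = ((d.insert g true).erase e0.2).items.map Prod.fst
          rw [hAitems, List.map_append, List.map_append,
            ← map_filter_comm Prod.snd (fun s => !(s == e0.2)) E,
            ← map_filter_comm Prod.fst (fun s => !(s == e0.2)) d.items]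
          rw [hkeysE]
          rfl
        · rw [List.pairwise_append]
          refine ⟨hpw.filter _, List.pairwise_singleton _ _, ?_⟩
          intro a ha b hb
          simp only [List.mem_singleton] at hb
          rw [hb]
          exact hbound a (List.mem_filter.mp ha).1
        · intro e he
          rcases List.mem_append.mp he with he | he
          · have := hbound e (List.mem_filter.mp he).1; omega
          · simp only [List.mem_singleton] at he
            rw [he]
            show pos < pos + 1
            omega
        · intro kv hkv
          rw [hAitems] at hkv
          rcases List.mem_append.mp hkv with h' | h'
          · exact hval kv (List.mem_filter.mp h').1
          · simp only [List.mem_singleton] at h'; rw [h']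
        · show (((d.insert g true).erase e0.2).items.map Prod.fst |>.map pvTk4).Nodup
          rw [hAitems, List.map_append, List.map_append, List.nodup_append]
          refine ⟨hnodup'.sublist (((d.items.filter_sublist).map Prod.fst).map pvTk4), by simp, ?_⟩
          intro x hx y hy
          have hy' : y = pvTk4 g := List.mem_singleton.mp hy
          obtain ⟨k, hk', hkx⟩ := List.mem_map.mp hx
          obtain ⟨p, hp', hpk⟩ := List.mem_map.mp hk'
          have hpmem := (List.mem_filter.mp hp').1
          have hpne : p.1 ≠ e0.2 := by
            have hq := (List.mem_filter.mp hp').2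
            simpa using hq
          have hkkeys : p.1 ∈ d.keys := List.mem_map_of_mem hpmem
          intro hxy
          exact hnocoll p.1 hkkeys hpne (by rw [hpk, hkx, hxy, hy'])
        · rw [PySem.Dict.items_insert_of_not_contains _ _ hcont2, List.map_append]
          exact hperm2.append_right _
    · rw [if_neg hlen, if_neg hlen]
      exact ⟨E, hkeysE, hpw, hbound, hval, hnodup, hperm⟩

lemma loop_preserves (gs : List String) :
    ∀ (d : PySem.Dict String Bool) (st : PySem.Dict String (Int × String) × Int),
      pvInv d st.1 st.2 →
      pvInv (gs.foldl refineStepA d) (gs.foldl refineStepB st).1 (gs.foldl refineStepB st).2 := by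
  induction gs with
  | nil => intro d st h; exact h
  | cons g gs ih =>
    intro d st h
    simp only [List.foldl_cons]
    have h2 := step_preserves d st.1 st.2 g h
    exact ih _ _ h2

lemma norm_eq_filterpass (genres : List String) :
    ∀ acc : List String,
      genres.foldl
        (fun acc raw =>
          if !(PySem.Str.isIn " " (if PySem.Str.lower raw = "self help" then "selfhelp" else PySem.Str.lower raw))
              || (if PySem.Str.lower raw = "self help" then "selfhelp" else PySem.Str.lower raw) = "selfhelp"
            then acc ++ [if PySem.Str.lower raw = "self help" then "selfhelp" else PySem.Str.lower raw]
            else acc) acc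
      = acc ++ (((genres.map (fun genre => PySem.Str.lower genre)).map
            (fun genre => if genre = "self help" then "selfhelp" else genre)).filter
            (fun genre => !(PySem.Str.isIn " " genre) || genre = "selfhelp")) := by
  induction genres with
  | nil => intro acc; simp
  | cons r rs ih =>
    intro acc
    simp only [List.foldl_cons, List.map_cons, List.filter_cons]
    by_cases hp : (!(PySem.Str.isIn " " (if PySem.Str.lower r = "self help" then "selfhelp" else PySem.Str.lower r))
        || (if PySem.Str.lower r = "self help" then "selfhelp" else PySem.Str.lower r) = "selfhelp") = true
    · rw [if_pos hp, ih, hp]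
      simp [List.append_assoc]
    · rw [if_neg hp]
      rw [ih]
      rw [Bool.not_eq_true] at hp
      rw [hp]
      simp

lemma empty_inv : pvInv PySem.Dict.empty PySem.Dict.empty 0 :=
  ⟨[], rfl, List.Pairwise.nil, by simp,
    by intro kv h; exact absurd h List.not_mem_nil,
    by exact List.nodup_nil,
    by exact List.Perm.refl []⟩

lemma refine_genres_equiv : ∀ (genres : List String),
    refine_genres genres = refine_genres_alt genres := by
  intro genres
  simp only [refine_genres, refine_genres_alt]
  rw [norm_eq_filterpass genres [], List.nil_append]
  set gs3 := ((genres.map (fun genre => PySem.Str.lower genre)).map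
      (fun genre => if genre = "self help" then "selfhelp" else genre)).filter
      (fun genre => !(PySem.Str.isIn " " genre) || genre = "selfhelp") with hgs3
  obtain ⟨E, hkeysE, hpw, hbound, hval, hnodup, hperm⟩ :=
    loop_preserves gs3 PySem.Dict.empty (PySem.Dict.empty, 0) empty_inv
  have hvals : (gs3.foldl refineStepB (PySem.Dict.empty, 0)).1.values.Perm E := by
    have h1 := hperm.map Prod.snd
    rw [List.map_map] at h1
    have h2 : List.map (Prod.snd ∘ fun e : Int × String => (pvTk4 e.2, e)) E = E := by
      rw [show (Prod.snd ∘ fun e : Int × String => (pvTk4 e.2, e)) = id from rfl, List.map_id]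
    rw [h2] at h1
    exact h1
  have hsorted1 : PySem.List.sorted (gs3.foldl refineStepB (PySem.Dict.empty, 0)).1.values
      (fun v => v.1) false = E :=
    PySem.List.sorted_eq_of_perm_of_pairwise_lt _ E _ hvals.symm hpw
  rw [hsorted1, hkeysE]
  have hkey : (fun g => PySem.Dict.getD (PySem.Dict.counter gs3) g 0)
      = (fun g => (PySem.List.count gs3 g : Int)) := by
    funext x
    rw [PySem.Dict.getD_counter, PySem.List.count_eq]
  rw [hkey]


-- ===== VERDICT (by name: the statement is the Claim_ definition above) =====
theorem refine_genres_spec : Claim_equal_refine_genres := by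
  intro genres _
  exact refine_genres_equiv genres
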